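-- pv_equiv track=rewrite | github.com/Enthalyon/python_practices | FuncionIntercambiemos.py | FuncionIntercambiemos
-- ===== SOURCE A (Python) =====
-- def FuncionIntercambiemos(L1,l2):
--     salida1 = 0
--     salida2 = 0
--     for elemeto in L1:
--         if elemeto not in L2:
--             salida1 += 1
--
--     for elemeto in L2:
--         if elemeto not in L1:
--             salida2 += 1
--     return min(salida1, salida2)
--
-- L2 = ["Nintendo","Muñeca","Perrito","Oso","Balón","Avión","Flechas"]# carrito Domino Corneta Cartas
-- ===== SOURCE B (Python) =====
-- def FuncionIntercambiemos(L1, l2):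
--     # Sort-merge join: sort both sides, advance two pointers; unmatched elements
--     # on each side are counted, runs of a common key are skipped wholesale.
--     a = sorted(L1)
--     b = sorted(L2)
--     n, m = len(a), len(b)
--     i = j = 0
--     salida1 = salida2 = 0
--     while i < n and j < m:
--         x, y = a[i], b[j]
--         if x < y:
--             salida1 += 1
--             i += 1
--         elif y < x:
--             salida2 += 1
--             j += 1
--         else:
--             while i < n and a[i] == x:
--                 i += 1
--             while j < m and b[j] == x:
--                 j += 1
--     return min(salida1 + (n - i), salida2 + (m - j))
--
-- L2 = ["Nintendo","Muñeca","Perrito","Oso","Balón","Avión","Flechas"]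
-- ===== Notes on version B (the rewrite author's own statement) =====
-- stated objective: alternative
-- what changed: B replaces A's per-element membership scans by a sort-merge join: it sorts both lists and walks them with two pointers, counting unmatched elements on each side and skipping whole runs of a common key.
import Mathlib
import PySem

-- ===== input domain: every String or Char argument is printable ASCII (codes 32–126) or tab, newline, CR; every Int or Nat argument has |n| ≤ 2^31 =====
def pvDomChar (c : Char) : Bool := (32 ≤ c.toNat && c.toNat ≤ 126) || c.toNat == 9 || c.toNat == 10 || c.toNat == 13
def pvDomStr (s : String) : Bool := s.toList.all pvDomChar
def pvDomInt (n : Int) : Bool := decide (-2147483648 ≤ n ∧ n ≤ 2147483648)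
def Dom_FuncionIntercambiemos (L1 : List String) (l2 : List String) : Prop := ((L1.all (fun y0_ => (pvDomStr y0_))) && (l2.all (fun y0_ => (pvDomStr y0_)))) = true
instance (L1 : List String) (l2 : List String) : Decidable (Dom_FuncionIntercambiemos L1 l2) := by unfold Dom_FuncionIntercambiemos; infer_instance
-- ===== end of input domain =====

-- B is a sort-merge join (sort both sides, two pointers, skip runs of a common key)
-- instead of A's per-element membership scans; both read the module global L2, the
-- parameter l2 is dead in A and stays dead in B.

-- the module-level constant L2 (both A and B read it; the parameter l2 is unused)
def pyL2 : List String := ["Nintendo", "Muñeca", "Perrito", "Oso", "Balón", "Avión", "Flechas"]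

-- ===== PORT A =====
def FuncionIntercambiemos (L1 : List String) (l2 : List String) : Int :=
  let salida1 := L1.foldl (fun s e => if e ∈ pyL2 then s else s + 1) (0 : Int)
  let salida2 := pyL2.foldl (fun s e => if e ∈ L1 then s else s + 1) (0 : Int)
  min salida1 salida2

-- ===== PORT B =====
-- the while loop of Source B as recursion on the two (sorted) suffixes; the base cases
-- carry the leftover counts (n - i, m - j) added after the loop
def mergeCnt : List String → List String → Int × Int
  | [], b => ((0 : Int), (b.length : Int))
  | x :: a, [] => (((x :: a).length : Int), (0 : Int))
  | x :: a, y :: b =>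
    if x < y then
      let r := mergeCnt a (y :: b)
      (r.1 + 1, r.2)
    else if y < x then
      let r := mergeCnt (x :: a) b
      (r.1, r.2 + 1)
    else
      mergeCnt ((x :: a).dropWhile (· == x)) ((y :: b).dropWhile (· == x))
termination_by a b => a.length + b.length
decreasing_by
  · simp
  · simp
  · have e1 : (x :: a).dropWhile (· == x) = a.dropWhile (· == x) :=
      List.dropWhile_cons_of_pos (by simp)
    have h1 := List.length_dropWhile_le (· == x) a
    have h2 := List.length_dropWhile_le (· == x) (y :: b)
    simp only [e1, List.length_cons] at *
    omega

def FuncionIntercambiemos_alt (L1 : List String) (l2 : List String) : Int :=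
  let a := PySem.List.sorted L1 (fun s => s) false
  let b := PySem.List.sorted pyL2 (fun s => s) false
  let r := mergeCnt a b
  min r.1 r.2

-- ===== PRECONDITION & SPEC =====
def Spec_FuncionIntercambiemos (L1 : List String) (l2 : List String) (out : Int) : Prop := out = FuncionIntercambiemos_alt L1 l2
instance (L1 : List String) (l2 : List String) (out : Int) : Decidable (Spec_FuncionIntercambiemos L1 l2 out) := by unfold Spec_FuncionIntercambiemos; infer_instance

-- ===== CLAIM (what is proved, stated in full; the proofs are below) =====
def Claim_equal_FuncionIntercambiemos : Prop := ∀ (L1 : List String) (l2 : List String), Dom_FuncionIntercambiemos L1 l2 → Spec_FuncionIntercambiemos L1 l2 (FuncionIntercambiemos L1 l2)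

-- ===== LEMMAS AND PROOFS =====

-- every member of a sorted list is at least its head
theorem head_le_of_sorted (x : String) (l : List String)
    (h : (x :: l).Pairwise (· ≤ ·)) : ∀ e ∈ x :: l, x ≤ e := by
  intro e he
  rcases List.mem_cons.mp he with he | he
  · exact he ▸ le_refl x
  · exact (List.pairwise_cons.mp h).1 e he

-- A's counting loop ('if e not in ys: salida += 1') is a countP
theorem foldl_if_skip (p : String → Prop) [DecidablePred p] (xs : List String) (s : Int) :
    xs.foldl (fun s e => if p e then s else s + 1) s = s + (xs.countP (fun e => !decide (p e)) : Int) := by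
  induction xs generalizing s with
  | nil => simp
  | cons x xs ih =>
    simp only [List.foldl_cons, List.countP_cons, ih]
    by_cases h : p x <;> simp [h] <;> ring

-- elements surviving the dropWhile of a run are strictly above the run's key
theorem dropWhile_run_gt (x : String) (l : List String) (hs : l.Pairwise (· ≤ ·))
    (hge : ∀ e ∈ l, x ≤ e) : ∀ e ∈ l.dropWhile (· == x), x < e := by
  induction l with
  | nil => simp
  | cons z l ih =>
    intro e he
    by_cases hz : z = x
    · subst hz
      rw [List.dropWhile_cons_of_pos (by simp)] at he
      exact ih (List.pairwise_cons.mp hs).2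
        (fun e he' => le_trans (hge z (by simp)) ((List.pairwise_cons.mp hs).1 e he')) e he
    · rw [List.dropWhile_cons_of_neg (by simp [hz])] at he
      have hxz : x < z := lt_of_le_of_ne (hge z (by simp)) (Ne.symm hz)
      rcases List.mem_cons.mp he with he | he
      · exact he ▸ hxz
      · exact hxz.trans_le ((List.pairwise_cons.mp hs).1 e he)

-- membership above the run's key is unchanged by dropping the run
theorem mem_dropWhile_run (x e : String) (l : List String) (hxe : x < e) :
    (e ∈ l.dropWhile (· == x)) ↔ e ∈ l := by
  conv_rhs => rw [← List.takeWhile_append_dropWhile (p := (· == x)) (l := l)]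
  simp only [List.mem_append]
  constructor
  · exact Or.inr
  · rintro (h | h)
    · have := List.mem_takeWhile_imp h
      simp at this
      exact absurd (this ▸ hxe) (lt_irrefl e)
    · exact h

-- counting a predicate that is false on the whole run collapses to the dropped tail
theorem countP_drop_run (x : String) (l : List String) (p : String → Bool) (hp : p x = false) :
    l.countP p = (l.dropWhile (· == x)).countP p := by
  conv_lhs => rw [← List.takeWhile_append_dropWhile (p := (· == x)) (l := l)]
  rw [List.countP_append]
  have : (l.takeWhile (· == x)).countP p = 0 := by
    rw [List.countP_eq_zero]
    intro e he
    have := List.mem_takeWhile_imp he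
    simp at this
    simpa [this] using hp
  omega

-- the merge computes, on sorted inputs, the two "absent from the other side" counts
theorem mergeCnt_spec (a b : List String) (ha : a.Pairwise (· ≤ ·)) (hb : b.Pairwise (· ≤ ·)) :
    mergeCnt a b = (((a.countP (fun e => !decide (e ∈ b)) : Nat) : Int),
                    ((b.countP (fun e => !decide (e ∈ a)) : Nat) : Int)) := by
  fun_induction mergeCnt a b with
  | case1 b => simp
  | case2 x a => simp
  | case3 x a y b hxy r ih =>
    -- x < y : x is absent from y::b, and no element of y::b equals x
    have hx_not : x ∉ y :: b := fun hmem =>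
      absurd (head_le_of_sorted y b hb x hmem) (not_le.mpr hxy)
    have hcnt2 : (y :: b).countP (fun e => !decide (e ∈ x :: a)) =
        (y :: b).countP (fun e => !decide (e ∈ a)) := by
      apply List.countP_congr
      intro e he
      have hne : e ≠ x := fun h => hx_not (h ▸ he)
      simp [hne]
    simp only [r]
    rw [ih (List.pairwise_cons.mp ha).2 hb, hcnt2]
    refine Prod.ext ?_ rfl
    rw [List.countP_cons_of_pos (p := fun e => !decide (e ∈ y :: b)) (by simp [hx_not])]
    push_cast
    ring
  | case4 x a y b hxy hyx r ih =>
    have hy_not : y ∉ x :: a := fun hmem =>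
      absurd (head_le_of_sorted x a ha y hmem) (not_le.mpr hyx)
    have hcnt1 : (x :: a).countP (fun e => !decide (e ∈ y :: b)) =
        (x :: a).countP (fun e => !decide (e ∈ b)) := by
      apply List.countP_congr
      intro e he
      have hne : e ≠ y := fun h => hy_not (h ▸ he)
      simp [hne]
    simp only [r]
    rw [ih ha (List.pairwise_cons.mp hb).2, hcnt1]
    refine Prod.ext rfl ?_
    rw [List.countP_cons_of_pos (p := fun e => !decide (e ∈ x :: a)) (by simp [hy_not])]
    push_cast
    ring
  | case5 x a y b hxy hyx ih =>
    have hxy' : x = y := le_antisymm (not_lt.mp hyx) (not_lt.mp hxy)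
    subst hxy'
    have hda : ((x :: a).dropWhile (· == x)).Pairwise (· ≤ ·) :=
      List.Pairwise.sublist (List.dropWhile_sublist _) ha
    have hdb : ((x :: b).dropWhile (· == x)).Pairwise (· ≤ ·) :=
      List.Pairwise.sublist (List.dropWhile_sublist _) hb
    have hga : ∀ e ∈ (x :: a).dropWhile (· == x), x < e :=
      dropWhile_run_gt x _ ha (head_le_of_sorted x a ha)
    have hgb : ∀ e ∈ (x :: b).dropWhile (· == x), x < e :=
      dropWhile_run_gt x _ hb (head_le_of_sorted x b hb)
    have hc1 : List.countP (fun e => !decide (e ∈ x :: b)) (x :: a)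
        = List.countP (fun e => !decide (e ∈ (x :: b).dropWhile (· == x)))
            ((x :: a).dropWhile (· == x)) := by
      rw [countP_drop_run x (x :: a) _ (by simp)]
      apply List.countP_congr
      intro e he
      rw [decide_eq_decide.mpr (mem_dropWhile_run x e (x :: b) (hga e he))]
    have hc2 : List.countP (fun e => !decide (e ∈ x :: a)) (x :: b)
        = List.countP (fun e => !decide (e ∈ (x :: a).dropWhile (· == x)))
            ((x :: b).dropWhile (· == x)) := by
      rw [countP_drop_run x (x :: b) _ (by simp)]
      apply List.countP_congr
      intro e he
      rw [decide_eq_decide.mpr (mem_dropWhile_run x e (x :: a) (hgb e he))]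
    rw [ih hda hdb, hc1, hc2]

-- membership is invariant under sorting, so the counts over the sorted lists
-- equal the counts over the originals
theorem side_count (xs ys : List String) :
    (PySem.List.sorted xs (fun s => s) false).countP
        (fun e => !decide (e ∈ PySem.List.sorted ys (fun s => s) false))
      = xs.countP (fun e => !decide (e ∈ ys)) := by
  rw [(PySem.List.sorted_perm xs (fun s => s) false).countP_eq]
  apply List.countP_congr
  intro e _
  simp [PySem.List.mem_sorted]

-- ===== VERDICT (by name: the statement is the Claim_ definition above) =====
theorem FuncionIntercambiemos_spec : Claim_equal_FuncionIntercambiemos := by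
  intro L1 l2 _
  show FuncionIntercambiemos L1 l2 = FuncionIntercambiemos_alt L1 l2
  unfold FuncionIntercambiemos FuncionIntercambiemos_alt
  dsimp only
  rw [foldl_if_skip (fun e => e ∈ pyL2) L1 0, foldl_if_skip (fun e => e ∈ L1) pyL2 0]
  rw [mergeCnt_spec _ _ (by simpa using PySem.List.sorted_pairwise L1 (fun s => s))
        (by simpa using PySem.List.sorted_pairwise pyL2 (fun s => s))]
  rw [side_count L1 pyL2, side_count pyL2 L1]
  simp
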